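-- pv_equiv track=rewrite | github.com/morohoke74085-ops/repolens | repolens/analyzer.py | _detect_ci
-- ===== SOURCE A (Python) =====
-- def _detect_ci(file_paths: set[str]) -> list[str]:
--     providers: list[str] = []
--     if any(path.startswith(".github/workflows/") for path in file_paths):
--         providers.append("GitHub Actions")
--     if ".gitlab-ci.yml" in file_paths:
--         providers.append("GitLab CI")
--     if any(path.startswith(".circleci/") for path in file_paths):
--         providers.append("CircleCI")
--     if "azure-pipelines.yml" in file_paths:
--         providers.append("Azure Pipelines")
--     return providers
-- ===== SOURCE B (Python) =====
-- def _detect_ci(file_paths: set[str]) -> list[str]: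
--     gh = gl = cc = az = False
--     for path in file_paths:
--         if path.startswith(".github/workflows/"):
--             gh = True
--         if path == ".gitlab-ci.yml":
--             gl = True
--         if path.startswith(".circleci/"):
--             cc = True
--         if path == "azure-pipelines.yml":
--             az = True
--     out: list[str] = []
--     if gh:
--         out.append("GitHub Actions")
--     if gl:
--         out.append("GitLab CI")
--     if cc:
--         out.append("CircleCI")
--     if az:
--         out.append("Azure Pipelines")
--     return out
-- ===== Notes on version B (the rewrite author's own statement) =====
-- stated objective: alternative
-- what changed: A runs four separate scans/membership tests over the path set; B makes one pass over the paths maintaining four boolean flags and then emits the provider names in the fixed canonical order.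
import Mathlib
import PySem

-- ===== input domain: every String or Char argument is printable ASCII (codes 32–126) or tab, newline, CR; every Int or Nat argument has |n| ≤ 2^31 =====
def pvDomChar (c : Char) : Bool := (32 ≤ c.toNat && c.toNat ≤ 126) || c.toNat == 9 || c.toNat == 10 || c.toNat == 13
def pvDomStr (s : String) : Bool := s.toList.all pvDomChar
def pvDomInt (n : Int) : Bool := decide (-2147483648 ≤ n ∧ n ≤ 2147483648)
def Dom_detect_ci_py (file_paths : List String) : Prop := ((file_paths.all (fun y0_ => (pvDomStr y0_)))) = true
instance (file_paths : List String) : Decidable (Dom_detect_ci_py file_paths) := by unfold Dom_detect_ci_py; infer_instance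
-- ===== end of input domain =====

-- B replaces A's four separate scans of the path set by one pass keeping four boolean
-- flags, emitting the provider names in the fixed canonical order afterwards (alternative decomposition).

-- ===== PORT A =====
def detect_ci_py (file_paths : List String) : List String :=
  let providers : List String := []
  let providers := if file_paths.any (fun path => PySem.Str.startswith path ".github/workflows/")
    then providers ++ ["GitHub Actions"] else providers
  let providers := if PySem.Set.contains file_paths ".gitlab-ci.yml"
    then providers ++ ["GitLab CI"] else providers
  let providers := if file_paths.any (fun path => PySem.Str.startswith path ".circleci/")
    then providers ++ ["CircleCI"] else providers
  let providers := if PySem.Set.contains file_paths "azure-pipelines.yml"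
    then providers ++ ["Azure Pipelines"] else providers
  providers

-- ===== PORT B =====
def detect_ci_py_alt_step (s : Bool × Bool × Bool × Bool) (path : String) : Bool × Bool × Bool × Bool :=
  ((s.1 || PySem.Str.startswith path ".github/workflows/"),
   (s.2.1 || path == ".gitlab-ci.yml"),
   (s.2.2.1 || PySem.Str.startswith path ".circleci/"),
   (s.2.2.2 || path == "azure-pipelines.yml"))

def detect_ci_py_alt (file_paths : List String) : List String :=
  let st := file_paths.foldl detect_ci_py_alt_step (false, false, false, false)
  (if st.1 then ["GitHub Actions"] else []) ++
  (if st.2.1 then ["GitLab CI"] else []) ++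
  (if st.2.2.1 then ["CircleCI"] else []) ++
  (if st.2.2.2 then ["Azure Pipelines"] else [])

-- ===== PRECONDITION & SPEC =====
def Spec_detect_ci_py (file_paths : List String) (out : List String) : Prop := out = detect_ci_py_alt file_paths
instance (file_paths : List String) (out : List String) : Decidable (Spec_detect_ci_py file_paths out) := by unfold Spec_detect_ci_py; infer_instance

-- ===== CLAIM (what is proved, stated in full; the proofs are below) =====
def Claim_equal_detect_ci_py : Prop := ∀ (file_paths : List String), Dom_detect_ci_py file_paths → Spec_detect_ci_py file_paths (detect_ci_py file_paths)

-- ===== LEMMAS AND PROOFS =====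

-- the fold accumulates the four flags as disjunctions with the four per-path tests
theorem detect_ci_flags (l : List String) (s : Bool × Bool × Bool × Bool) :
    l.foldl detect_ci_py_alt_step s =
      ((s.1 || l.any (fun path => PySem.Str.startswith path ".github/workflows/")),
       (s.2.1 || l.any (fun path => path == ".gitlab-ci.yml")),
       (s.2.2.1 || l.any (fun path => PySem.Str.startswith path ".circleci/")),
       (s.2.2.2 || l.any (fun path => path == "azure-pipelines.yml"))) := by
  induction l generalizing s with
  | nil => simp
  | cons x xs ih =>
    simp [List.foldl_cons, ih, detect_ci_py_alt_step, Bool.or_assoc]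

theorem set_contains_eq_any (l : List String) (c : String) :
    PySem.Set.contains l c = l.any (fun path => path == c) := by
  simp [PySem.Set.contains_eq_listContains, List.any_eq]

-- ===== VERDICT (by name: the statement is the Claim_ definition above) =====
theorem detect_ci_py_spec : Claim_equal_detect_ci_py := by
  intro file_paths _
  unfold Spec_detect_ci_py detect_ci_py detect_ci_py_alt
  rw [detect_ci_flags, set_contains_eq_any, set_contains_eq_any]
  cases file_paths.any (fun path => PySem.Str.startswith path ".github/workflows/") <;>
  cases file_paths.any (fun path => path == ".gitlab-ci.yml") <;>
  cases file_paths.any (fun path => PySem.Str.startswith path ".circleci/") <;>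
  cases file_paths.any (fun path => path == "azure-pipelines.yml") <;> simp
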